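-- pv_equiv track=rewrite | github.com/dtdoering/KEMET | kemet.py | HMM_hits_longest_translated_sequences
-- ===== SOURCE A (Python) =====
-- def HMM_hits_longest_translated_sequences(HMM_hits_dict, HMM_hits_TRANSLATED_dict):
--     """
--     Compares the HMM translated hits and keep the longest hit without a stop codon.
--     Stores them in a dictionary-object.
--
--     Args:
--         HMM_hits_dict                   (dict): Python-dictionary object output of "HMM_hits_sequences()"
--         HMM_hits_TRANSLATED_dict        (dict): Python-dictionary object output of "HMM_hits_translated_sequences()"
--
--     Returns:
--         HMM_hits_TRANSLATED_MAXLEN_dict (dict): Python-dictionary object: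
--                                                 keys: ">MAG/Genome+KO+frame_indication"
--                                                 values: "aa sequence" - only the longest without stop codons (*)
--     """
--     max_len_dict = { fasta_nf: [] for fasta_nf in HMM_hits_dict }
--
--     HMM_hits_TRANSLATED_MAXLEN_dict = {}
--
--     for fasta_id, seq in HMM_hits_TRANSLATED_dict.items():
--         fasta_nf = fasta_id.split("__")[0]
--         seq = seq.split("*")                   # divided by stop codons
--         seq_max = max(seq, key=len)            # longer for single reading frame
--         max_len_dict[fasta_nf].append(seq_max) # add the longest to list
--
--     for fasta_nf in max_len_dict:
--         seq_max_allframes = max(max_len_dict[fasta_nf], key=len)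
--         frame = "__f"+str(max_len_dict[fasta_nf].index(seq_max_allframes)+1)
--         HMM_hits_TRANSLATED_MAXLEN_dict.update({fasta_nf+frame:seq_max_allframes})
--
--     return HMM_hits_TRANSLATED_MAXLEN_dict
-- ===== SOURCE B (Python) =====
-- def HMM_hits_longest_translated_sequences(HMM_hits_dict, HMM_hits_TRANSLATED_dict):
--     best = {}  # genome -> (best fragment, its 1-based frame, hits seen so far)
--     for fasta_id, seq in HMM_hits_TRANSLATED_dict.items():
--         genome = fasta_id.split("__")[0]
--         frag = max(seq.split("*"), key=len)
--         cur = best.get(genome)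
--         if cur is None:
--             best[genome] = (frag, 1, 1)
--         elif len(frag) > len(cur[0]):
--             best[genome] = (frag, cur[2] + 1, cur[2] + 1)
--         else:
--             best[genome] = (cur[0], cur[1], cur[2] + 1)
--     return {g + "__f" + str(best[g][1]): best[g][0] for g in HMM_hits_dict}
-- ===== Notes on version B (the rewrite author's own statement) =====
-- stated objective: simpler
-- what changed: B replaces A's two-pass scheme (build per-genome lists of best fragments, then per genome take max(key=len) and recover the frame with .index) by a single pass over the translated hits that keeps, per genome, only the current best fragment, its 1-based frame and a running hit counter, building the result directly from that dict.
import Mathlib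
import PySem

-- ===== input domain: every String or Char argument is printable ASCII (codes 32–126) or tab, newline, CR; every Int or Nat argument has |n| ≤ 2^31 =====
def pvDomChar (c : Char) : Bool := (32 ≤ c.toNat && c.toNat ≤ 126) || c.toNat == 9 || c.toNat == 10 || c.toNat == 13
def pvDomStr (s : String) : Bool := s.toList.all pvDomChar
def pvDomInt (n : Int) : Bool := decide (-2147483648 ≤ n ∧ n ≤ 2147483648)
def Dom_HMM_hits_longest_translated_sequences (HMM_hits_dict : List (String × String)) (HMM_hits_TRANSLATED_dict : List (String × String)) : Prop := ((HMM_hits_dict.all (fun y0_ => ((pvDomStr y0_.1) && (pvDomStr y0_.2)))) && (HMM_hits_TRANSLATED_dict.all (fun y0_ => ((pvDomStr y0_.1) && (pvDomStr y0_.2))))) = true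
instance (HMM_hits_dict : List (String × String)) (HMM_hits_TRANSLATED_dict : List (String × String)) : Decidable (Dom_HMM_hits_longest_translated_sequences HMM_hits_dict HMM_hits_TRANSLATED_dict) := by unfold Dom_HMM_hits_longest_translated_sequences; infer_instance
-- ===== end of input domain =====

-- B replaces A's two-pass build (per-genome fragment lists, then max+.index per genome) by a single
-- pass keeping only each genome's current best fragment, its frame and a hit counter (simpler, O(1)
-- extra state per genome instead of a list).

-- shared primitive subexpressions of both Pythons:
-- fasta_id.split("__")[0]  (split with a non-empty separator never fails, result is never empty)
def pvGenome (s : String) : String := ((PySem.Str.split? s "__").getD []).headD ""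
-- max(seq.split("*"), key=len)  (never empty, so the .getD default is never used)
def pvFrag (s : String) : String := (PySem.List.max? ((PySem.Str.split? s "*").getD []) PySem.Str.len).getD ""

-- ===== PORT A =====
def HMM_hits_longest_translated_sequences (HMM_hits_dict : List (String × String)) (HMM_hits_TRANSLATED_dict : List (String × String)) : List (String × String) :=
  -- max_len_dict = { fasta_nf: [] for fasta_nf in HMM_hits_dict }
  let mld0 : PySem.Dict String (List String) :=
    (PySem.Dict.ofList HMM_hits_dict : PySem.Dict String String).keys.foldl
      (fun d k => d.insert k []) PySem.Dict.empty
  -- first loop: max_len_dict[fasta_nf].append(seq_max)   (KeyError on a missing key is outside Pre_;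
  -- modify with default [] agrees with Python wherever Pre_ holds)
  let mld : PySem.Dict String (List String) :=
    (PySem.Dict.ofList HMM_hits_TRANSLATED_dict : PySem.Dict String String).items.foldl
      (fun d p => d.modify (pvGenome p.1) [] (fun l => l ++ [pvFrag p.2])) mld0
  -- second loop over max_len_dict's keys (ValueError of max([]) is outside Pre_)
  (mld.keys.foldl (fun out g =>
      let L := mld.getD g []
      let seq_max := (PySem.List.max? L PySem.Str.len).getD ""
      let frame := "__f" ++ PySem.Int.toStr (((PySem.List.index? L seq_max).getD 0 : Int) + 1)
      out.insert (g ++ frame) seq_max)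
    (PySem.Dict.empty : PySem.Dict String String)).items

-- ===== PORT B =====
-- one-pass update of (best fragment, its frame, hits seen) for one genome
def pvStep (cur : Option (String × Int × Int)) (frag : String) : String × Int × Int :=
  match cur with
  | none => (frag, 1, 1)
  | some (b, f, c) => if PySem.Str.len b < PySem.Str.len frag then (frag, c + 1, c + 1) else (b, f, c + 1)

def HMM_hits_longest_translated_sequences_alt (HMM_hits_dict : List (String × String)) (HMM_hits_TRANSLATED_dict : List (String × String)) : List (String × String) :=
  let best : PySem.Dict String (String × Int × Int) :=
    (PySem.Dict.ofList HMM_hits_TRANSLATED_dict : PySem.Dict String String).items.foldl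
      (fun d p => d.insert (pvGenome p.1) (pvStep (d.get? (pvGenome p.1)) (pvFrag p.2)))
      PySem.Dict.empty
  -- {g + "__f" + str(best[g][1]): best[g][0] for g in HMM_hits_dict}  (KeyError outside Pre_)
  ((PySem.Dict.ofList HMM_hits_dict : PySem.Dict String String).keys.foldl (fun out g =>
      let e := best.getD g ("", 0, 0)
      out.insert (g ++ "__f" ++ PySem.Int.toStr e.2.1) e.1)
    (PySem.Dict.empty : PySem.Dict String String)).items

-- ===== PRECONDITION & SPEC =====
-- Pre_ excludes exactly the inputs where A raises: a translated id whose genome prefix is not a key of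
-- HMM_hits_dict (KeyError), or a genome of HMM_hits_dict with no translated hit (ValueError of max([])).
def Pre_HMM_hits_longest_translated_sequences (HMM_hits_dict : List (String × String)) (HMM_hits_TRANSLATED_dict : List (String × String)) : Prop :=
  (∀ p ∈ HMM_hits_TRANSLATED_dict, pvGenome p.1 ∈ HMM_hits_dict.map Prod.fst) ∧
  (∀ q ∈ HMM_hits_dict, ∃ p ∈ HMM_hits_TRANSLATED_dict, pvGenome p.1 = q.1)
instance (HMM_hits_dict : List (String × String)) (HMM_hits_TRANSLATED_dict : List (String × String)) : Decidable (Pre_HMM_hits_longest_translated_sequences HMM_hits_dict HMM_hits_TRANSLATED_dict) := by unfold Pre_HMM_hits_longest_translated_sequences; infer_instance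

def pvWitness_HMM_hits_longest_translated_sequences : (List (String × String)) × (List (String × String)) :=
  ([("g", "ATG")], [("g__1", "AB*C"), ("g__2", "XYZQ*")])

def Spec_HMM_hits_longest_translated_sequences (HMM_hits_dict : List (String × String)) (HMM_hits_TRANSLATED_dict : List (String × String)) (out : List (String × String)) : Prop := out = HMM_hits_longest_translated_sequences_alt HMM_hits_dict HMM_hits_TRANSLATED_dict
instance (HMM_hits_dict : List (String × String)) (HMM_hits_TRANSLATED_dict : List (String × String)) (out : List (String × String)) : Decidable (Spec_HMM_hits_longest_translated_sequences HMM_hits_dict HMM_hits_TRANSLATED_dict out) := by unfold Spec_HMM_hits_longest_translated_sequences; infer_instance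

-- ===== CLAIM (what is proved, stated in full; the proofs are below) =====
def Claim_equal_HMM_hits_longest_translated_sequences : Prop := ∀ (HMM_hits_dict : List (String × String)) (HMM_hits_TRANSLATED_dict : List (String × String)), Dom_HMM_hits_longest_translated_sequences HMM_hits_dict HMM_hits_TRANSLATED_dict → Pre_HMM_hits_longest_translated_sequences HMM_hits_dict HMM_hits_TRANSLATED_dict → Spec_HMM_hits_longest_translated_sequences HMM_hits_dict HMM_hits_TRANSLATED_dict (HMM_hits_longest_translated_sequences HMM_hits_dict HMM_hits_TRANSLATED_dict)

-- ===== LEMMAS AND PROOFS =====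

-- updating a set with elements it already holds leaves it unchanged
theorem pvSet_update_eq_self (l : List String) : ∀ (s : PySem.Set String), (∀ x ∈ l, x ∈ s) → PySem.Set.update s l = s := by
  induction l with
  | nil => intro s _; rfl
  | cons x t ih =>
    intro s h
    have hx : PySem.Set.add s x = s := by
      simp [PySem.Set.add, PySem.Set.contains, h x (by simp)]
    show PySem.Set.update (PySem.Set.add s x) t = s
    rw [hx]
    exact ih s (fun y hy => h y (by simp [hy]))

-- the initial {fasta_nf: []} dict looks up to [] at every key
theorem pvInit_getD (ks : List String) : ∀ (d : PySem.Dict String (List String)) (g : String), d.getD g [] = [] → (ks.foldl (fun d k => d.insert k ([] : List String)) d).getD g [] = [] := by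
  induction ks with
  | nil => intro d g h; simpa using h
  | cons k t ih =>
    intro d g h
    simp only [List.foldl_cons]
    refine ih _ g ?_
    rw [PySem.Dict.getD_insert]
    split <;> simp [h]

-- projecting B's one-pass grouped fold at a single key
theorem pvProj (l : List (String × String)) : ∀ (d : PySem.Dict String (String × Int × Int)) (c : String),
    (l.foldl (fun d p => d.insert (pvGenome p.1) (pvStep (d.get? (pvGenome p.1)) (pvFrag p.2))) d).get? c
    = ((l.filter (fun p => pvGenome p.1 == c)).map (fun p => pvFrag p.2)).foldl (fun cur f => some (pvStep cur f)) (d.get? c) := by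
  induction l with
  | nil => intro d c; rfl
  | cons p t ih =>
    intro d c
    simp only [List.foldl_cons, List.filter_cons]
    by_cases h : pvGenome p.1 = c
    · subst h
      simp [ih]
    · simp [ih, PySem.Dict.get?_insert, h, Ne.symm h]

-- B's running best/frame/count equals A's max + .index + len of the per-genome fragment list
theorem pvCore : ∀ (L : List String) (m : String), PySem.List.max? L PySem.Str.len = some m →
    L.foldl (fun cur f => some (pvStep cur f)) none
    = some (m, ((PySem.List.index? L m).getD 0 : Int) + 1, (L.length : Int)) := by
  intro L
  induction L using List.reverseRecOn with
  | nil => intro m h; simp [PySem.List.max?] at h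
  | append_singleton L x ih =>
    intro m h
    rcases hL : PySem.List.max? L PySem.Str.len with _ | b
    · have hnil : L = [] := (PySem.List.max?_eq_none_iff _ _).mp hL
      subst hnil
      have hx : x = m := by simpa [PySem.List.max?] using h
      subst hx
      rw [show ([] : List String) ++ [x] = [x] from rfl, PySem.List.index?_cons_self]
      simp [pvStep]
    · have hfold := ih b hL
      have hmax : PySem.List.max? (L ++ [x]) PySem.Str.len
          = some (if PySem.Str.len b < PySem.Str.len x then x else b) := by
        unfold PySem.List.max? at hL ⊢
        rw [List.foldl_append, hL]
        by_cases hc : PySem.Str.len b < PySem.Str.len x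
        · rw [if_pos hc]
          show (if PySem.Str.len b < PySem.Str.len x then some x else some b) = some x
          rw [if_pos hc]
        · rw [if_neg hc]
          show (if PySem.Str.len b < PySem.Str.len x then some x else some b) = some b
          rw [if_neg hc]
      rw [hmax] at h
      by_cases hlt : PySem.Str.len b < PySem.Str.len x
      · rw [if_pos hlt] at h
        have hm : m = x := (Option.some.inj h).symm
        subst hm
        have hnot : m ∉ L := by
          intro hmem
          exact absurd hlt (not_lt.mpr (PySem.List.max?_isMax hL _ hmem))
        rw [List.foldl_append, hfold, PySem.List.index?_append_singleton_self L m hnot]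
        simp only [List.foldl_cons, List.foldl_nil, pvStep]
        rw [if_pos hlt]
        simp only [Option.getD_some, List.length_append, List.length_cons, List.length_nil]
        push_cast
        rfl
      · rw [if_neg hlt] at h
        have hm : m = b := (Option.some.inj h).symm
        subst hm
        rw [List.foldl_append, hfold, PySem.List.index?_append_of_mem [x] (PySem.List.max?_mem hL)]
        simp only [List.foldl_cons, List.foldl_nil, pvStep]
        rw [if_neg hlt]
        simp only [List.length_append, List.length_cons, List.length_nil]
        push_cast
        rfl

-- ===== VERDICT (by name: the statement is the Claim_ definition above) =====
theorem HMM_hits_longest_translated_sequences_spec : Claim_equal_HMM_hits_longest_translated_sequences := by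
  intro H T _ hPre
  unfold Spec_HMM_hits_longest_translated_sequences
  unfold HMM_hits_longest_translated_sequences HMM_hits_longest_translated_sequences_alt
  simp only []
  set ks := (PySem.Dict.ofList H : PySem.Dict String String).keys with hksdef
  set l := (PySem.Dict.ofList T : PySem.Dict String String).items with hldef
  have hndk : ks.Nodup := PySem.Dict.nodup_keys_ofList H
  have hkeysH : ∀ g : String, g ∈ ks ↔ g ∈ H.map Prod.fst := by
    intro g
    have hk : ks = PySem.Set.ofList (H.map Prod.fst) := by
      rw [hksdef]
      show ((PySem.Dict.empty : PySem.Dict String String).update H).keys = _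
      unfold PySem.Dict.update
      rw [PySem.Dict.keys_foldl_insert_key H Prod.fst (fun _ p => p.2) PySem.Dict.empty]
      rfl
    rw [hk]
    exact PySem.Set.mem_ofList _ g
  have hkeysT : ∀ s : String, s ∈ l.map Prod.fst ↔ s ∈ T.map Prod.fst := by
    intro s
    have hk : l.map Prod.fst = PySem.Set.ofList (T.map Prod.fst) := by
      rw [hldef]
      show ((PySem.Dict.empty : PySem.Dict String String).update T).keys = _
      unfold PySem.Dict.update
      rw [PySem.Dict.keys_foldl_insert_key T Prod.fst (fun _ p => p.2) PySem.Dict.empty]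
      rfl
    rw [hk]
    exact PySem.Set.mem_ofList _ s
  have hl1 : ∀ p ∈ l, pvGenome p.1 ∈ ks := by
    intro p hp
    obtain ⟨q, hq, hq1⟩ := List.mem_map.mp ((hkeysT p.1).mp (List.mem_map_of_mem hp))
    have hq2 := hPre.1 q hq
    rw [hq1] at hq2
    exact (hkeysH _).mpr hq2
  have hcov : ∀ g ∈ ks, ∃ p ∈ l, pvGenome p.1 = g := by
    intro g hg
    obtain ⟨q, hq, hq1⟩ := List.mem_map.mp ((hkeysH g).mp hg)
    obtain ⟨p, hp, hpg⟩ := hPre.2 q hq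
    obtain ⟨p', hp', hp'1⟩ := List.mem_map.mp ((hkeysT p.1).mpr (List.mem_map_of_mem hp))
    exact ⟨p', hp', by rw [hp'1, hpg, hq1]⟩
  set mld0 := ks.foldl (fun d k => d.insert k ([] : List String)) PySem.Dict.empty with hmld0def
  set mld := l.foldl (fun d p => d.modify (pvGenome p.1) [] (fun ll => ll ++ [pvFrag p.2])) mld0 with hmlddef
  have hmld0keys : mld0.keys = ks := by
    rw [hmld0def, PySem.Dict.keys_foldl_insert ks (fun _ _ => ([] : List String)) PySem.Dict.empty]
    show PySem.Set.ofList ks = ks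
    exact PySem.Set.ofList_eq_self_of_nodup ks hndk
  have hmldkeys : mld.keys = ks := by
    rw [hmlddef, PySem.Dict.keys_foldl_modify_key l (fun p => pvGenome p.1) ([] : List String) (fun _ p => fun ll => ll ++ [pvFrag p.2]) mld0, hmld0keys]
    refine pvSet_update_eq_self _ _ ?_
    intro x hx
    obtain ⟨p, hp, hpe⟩ := List.mem_map.mp hx
    exact hpe ▸ hl1 p hp
  have hL : ∀ g : String, mld.getD g [] = ((l.filter (fun p => pvGenome p.1 == g)).map (fun p => pvFrag p.2)) := by
    intro g
    have h1 := PySem.Dict.getD_foldl_modify_append (l.map (fun p : String × String => (pvGenome p.1, pvFrag p.2))) mld0 g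
    rw [List.foldl_map] at h1
    dsimp only at h1
    have h0 : mld0.getD g [] = [] := by
      rw [hmld0def]
      exact pvInit_getD ks PySem.Dict.empty g rfl
    rw [hmlddef, h1, h0]
    simp [List.filter_map, List.map_map, Function.comp_def]
  rw [hmldkeys]
  refine congrArg PySem.Dict.items (PySem.List.foldl_congr_mem ks _ _ PySem.Dict.empty ?_)
  intro acc g hg
  obtain ⟨p0, hp0, hpg⟩ := hcov g hg
  have hne : (l.filter (fun p => pvGenome p.1 == g)).map (fun p => pvFrag p.2) ≠ [] := by
    have hmem : p0 ∈ l.filter (fun p => pvGenome p.1 == g) := List.mem_filter.mpr ⟨hp0, by simp [hpg]⟩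
    have hmem2 := List.mem_map_of_mem (f := fun p => pvFrag p.2) hmem
    intro hemp
    rw [hemp] at hmem2
    exact List.not_mem_nil hmem2
  rcases hM : PySem.List.max? ((l.filter (fun p => pvGenome p.1 == g)).map (fun p => pvFrag p.2)) PySem.Str.len with _ | m
  · exact absurd ((PySem.List.max?_eq_none_iff _ _).mp hM) hne
  · have hB : (l.foldl (fun d p => d.insert (pvGenome p.1) (pvStep (d.get? (pvGenome p.1)) (pvFrag p.2))) (PySem.Dict.empty : PySem.Dict String (String × Int × Int))).getD g ("", 0, 0)
        = (m, ((PySem.List.index? ((l.filter (fun p => pvGenome p.1 == g)).map (fun p => pvFrag p.2)) m).getD 0 : Int) + 1, (((l.filter (fun p => pvGenome p.1 == g)).map (fun p => pvFrag p.2)).length : Int)) := by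
      rw [PySem.Dict.getD_eq_get?_getD, pvProj l PySem.Dict.empty g]
      rw [show (PySem.Dict.empty : PySem.Dict String (String × Int × Int)).get? g = none from rfl]
      rw [pvCore _ m hM]
      rfl
    rw [hL g, hM, hB]
    simp [String.append_assoc]
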